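-- pv_equiv track=rewrite | github.com/Ade-Pyaar/New_POS_Tagging_App | utils.py | assign_unk
-- ===== SOURCE A (Python) =====
-- import string, json, math
--
-- punct = set(string.punctuation)
--
-- noun_suffix = ["action", "age", "ance", "cy", "dom", "ee", "ence", "er", "hood", "ion", "ism", "ist", "ity", "ling", "ment", "ness", "or", "ry", "scape", "ship", "ty"]
--
-- verb_suffix = ["ate", "ify", "ise", "ize"]
--
-- adj_suffix = ["able", "ese", "ful", "i", "ian", "ible", "ic", "ish", "ive", "less", "ly", "ous"]
--
-- adv_suffix = ["ward", "wards", "wise"]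
--
-- def assign_unk(tok):
--     """
--     Assign unknown word tokens
--     """
--     # Digits
--     if any(char.isdigit() for char in tok):
--         return "--unk_digit--"
--
--     # Punctuation
--     elif any(char in punct for char in tok):
--         return "--unk_punct--"
--
--     # Upper-case
--     elif any(char.isupper() for char in tok):
--         return "--unk_upper--"
--
--     # Nouns
--     elif any(tok.endswith(suffix) for suffix in noun_suffix):
--         return "--unk_noun--"
--
--     # Verbs
--     elif any(tok.endswith(suffix) for suffix in verb_suffix):
--         return "--unk_verb--"
--
--     # Adjectives
--     elif any(tok.endswith(suffix) for suffix in adj_suffix):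
--         return "--unk_adj--"
--
--     # Adverbs
--     elif any(tok.endswith(suffix) for suffix in adv_suffix):
--         return "--unk_adv--"
--
--     return "--unk--"
-- ===== SOURCE B (Python) =====
-- import string
--
-- punct = set(string.punctuation)
--
-- noun_suffix = ["action", "age", "ance", "cy", "dom", "ee", "ence", "er", "hood", "ion", "ism", "ist", "ity", "ling", "ment", "ness", "or", "ry", "scape", "ship", "ty"]
-- verb_suffix = ["ate", "ify", "ise", "ize"]
-- adj_suffix = ["able", "ese", "ful", "i", "ian", "ible", "ic", "ish", "ive", "less", "ly", "ous"]
-- adv_suffix = ["ward", "wards", "wise"]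
--
-- _noun_set = set(noun_suffix)
-- _verb_set = set(verb_suffix)
-- _adj_set = set(adj_suffix)
-- _adv_set = set(adv_suffix)
--
-- _max_suffix_len = max(len(s) for s in noun_suffix + verb_suffix + adj_suffix + adv_suffix)
--
-- _char_labels = ("--unk_digit--", "--unk_punct--", "--unk_upper--")
-- _suffix_labels = ("--unk_noun--", "--unk_verb--", "--unk_adj--", "--unk_adv--", "--unk--")
--
--
-- def _char_rank(ch):
--     """Priority rank of a character: 0 digit, 1 punctuation, 2 upper, 3 other."""
--     if ch.isdigit():
--         return 0
--     if ch in punct: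
--         return 1
--     if ch.isupper():
--         return 2
--     return 3
--
--
-- def _suffix_rank(suf):
--     """Priority rank of a candidate suffix string: 0 noun .. 3 adv, 4 none."""
--     if suf in _noun_set:
--         return 0
--     if suf in _verb_set:
--         return 1
--     if suf in _adj_set:
--         return 2
--     if suf in _adv_set:
--         return 3
--     return 4
--
--
-- def assign_unk(tok):
--     """Assign unknown word tokens by min-rank reduction."""
--     r = 3
--     for ch in tok:
--         r = min(r, _char_rank(ch))
--     if r < 3:
--         return _char_labels[r]
--     s = 4
--     for i in range(max(0, len(tok) - _max_suffix_len), len(tok)):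
--         s = min(s, _suffix_rank(tok[i:]))
--     return _suffix_labels[s]
-- ===== Notes on version B (the rewrite author's own statement) =====
-- stated objective: alternative
-- what changed: B replaces A's cascade of any()/endswith tests by two min-rank reductions: one pass over the characters taking the minimum of a per-character priority rank (digit<punct<upper), then a pass over the token's last max-suffix-length suffixes tok[i:] ranked by set membership in the four suffix groups, finally indexing a label tuple by the minimum rank; no endswith test remains.
import Mathlib
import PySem

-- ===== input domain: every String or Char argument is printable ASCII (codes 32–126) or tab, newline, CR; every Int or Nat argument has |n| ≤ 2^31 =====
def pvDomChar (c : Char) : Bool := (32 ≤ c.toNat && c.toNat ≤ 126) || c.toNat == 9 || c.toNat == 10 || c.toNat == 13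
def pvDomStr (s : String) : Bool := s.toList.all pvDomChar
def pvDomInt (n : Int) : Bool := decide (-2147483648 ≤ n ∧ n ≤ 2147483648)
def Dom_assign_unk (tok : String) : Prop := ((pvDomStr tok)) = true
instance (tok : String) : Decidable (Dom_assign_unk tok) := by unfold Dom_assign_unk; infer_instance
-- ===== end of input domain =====

-- B replaces A's cascade of any()/endswith tests by two min-rank reductions (per-character
-- priority rank, then set-membership rank over the token's own suffixes) indexing label tables.

-- ===== PORT A =====
def punct_chars : List Char := "!\"#$%&'()*+,-./:;<=>?@[\\]^_`{|}~".toList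

def noun_suffix : List String := ["action", "age", "ance", "cy", "dom", "ee", "ence", "er", "hood", "ion", "ism", "ist", "ity", "ling", "ment", "ness", "or", "ry", "scape", "ship", "ty"]
def verb_suffix : List String := ["ate", "ify", "ise", "ize"]
def adj_suffix : List String := ["able", "ese", "ful", "i", "ian", "ible", "ic", "ish", "ive", "less", "ly", "ous"]
def adv_suffix : List String := ["ward", "wards", "wise"]

def assign_unk (tok : String) : String :=
  if tok.toList.any (fun c => PySem.Chars.isdigit c) then "--unk_digit--"
  else if tok.toList.any (fun c => punct_chars.contains c) then "--unk_punct--"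
  else if tok.toList.any (fun c => PySem.Chars.isupper c) then "--unk_upper--"
  else if noun_suffix.any (fun s => PySem.Str.endswith tok s) then "--unk_noun--"
  else if verb_suffix.any (fun s => PySem.Str.endswith tok s) then "--unk_verb--"
  else if adj_suffix.any (fun s => PySem.Str.endswith tok s) then "--unk_adj--"
  else if adv_suffix.any (fun s => PySem.Str.endswith tok s) then "--unk_adv--"
  else "--unk--"

-- ===== PORT B =====
-- Source B's _char_rank: 0 digit, 1 punctuation, 2 upper, 3 other
def charRank (c : Char) : Nat :=
  if PySem.Chars.isdigit c then 0
  else if punct_chars.contains c then 1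
  else if PySem.Chars.isupper c then 2
  else 3

-- Source B's suffix sets (strings as char lists)
def nounKeys : List (List Char) := noun_suffix.map String.toList
def verbKeys : List (List Char) := verb_suffix.map String.toList
def adjKeys : List (List Char) := adj_suffix.map String.toList
def advKeys : List (List Char) := adv_suffix.map String.toList

-- Source B's _suffix_rank: 0 noun .. 3 adv, 4 none
def sufRank (l : List Char) : Nat :=
  if nounKeys.contains l then 0
  else if verbKeys.contains l then 1
  else if adjKeys.contains l then 2
  else if advKeys.contains l then 3
  else 4

-- Source B's _max_suffix_len = max(len(s) for s in all suffix lists)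
def max_suffix_len : Nat :=
  (((noun_suffix ++ verb_suffix ++ adj_suffix ++ adv_suffix).map (fun t => t.toList.length)).foldl max 0)

def char_labels : List String := ["--unk_digit--", "--unk_punct--", "--unk_upper--"]
def suffix_labels : List String := ["--unk_noun--", "--unk_verb--", "--unk_adj--", "--unk_adv--", "--unk--"]

def assign_unk_alt (tok : String) : String :=
  let l := tok.toList
  let r := l.foldl (fun m c => min m (charRank c)) 3
  if r < 3 then char_labels.getD r "--unk--"   -- tuple index; r is always in range
  else
    let a := l.length - max_suffix_len         -- max(0, len - _max_suffix_len): Nat subtraction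
    let s := (List.range' a (l.length - a)).foldl (fun m i => min m (sufRank (l.drop i))) 4
    suffix_labels.getD s "--unk--"             -- tuple index; s is always in range

-- ===== PRECONDITION & SPEC =====
def Spec_assign_unk (tok : String) (out : String) : Prop := out = assign_unk_alt tok
instance (tok : String) (out : String) : Decidable (Spec_assign_unk tok out) := by unfold Spec_assign_unk; infer_instance

-- ===== CLAIM =====
def Claim_equal_assign_unk : Prop := ∀ (tok : String), Dom_assign_unk tok → Spec_assign_unk tok (assign_unk tok)

-- ===== LEMMAS AND PROOFS =====
theorem foldl_min_le {α : Type} (f : α → Nat) (k : Nat) (l : List α) (a : Nat) :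
    (l.foldl (fun m x => min m (f x)) a ≤ k) ↔ (a ≤ k ∨ ∃ x ∈ l, f x ≤ k) := by
  induction l generalizing a with
  | nil => simp
  | cons c cs ih =>
      simp only [List.foldl_cons, ih, min_le_iff, List.mem_cons]
      constructor
      · rintro (h | h)
        · rcases h with h | h
          · exact Or.inl h
          · exact Or.inr ⟨c, Or.inl rfl, h⟩
        · rcases h with ⟨x, hx, hf⟩; exact Or.inr ⟨x, Or.inr hx, hf⟩
      · rintro (h | ⟨x, hx | hx, hf⟩)
        · exact Or.inl (Or.inl h)
        · exact Or.inl (Or.inr (hx ▸ hf))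
        · exact Or.inr ⟨x, hx, hf⟩

theorem charRank_le0 (c : Char) : charRank c ≤ 0 ↔ PySem.Chars.isdigit c = true := by
  unfold charRank; split_ifs <;> simp_all

theorem charRank_le1 (c : Char) : charRank c ≤ 1 ↔
    (PySem.Chars.isdigit c = true ∨ punct_chars.contains c = true) := by
  unfold charRank; split_ifs <;> simp_all

theorem charRank_le2 (c : Char) : charRank c ≤ 2 ↔
    (PySem.Chars.isdigit c = true ∨ punct_chars.contains c = true ∨ PySem.Chars.isupper c = true) := by
  unfold charRank; split_ifs <;> simp_all

theorem drop_exists_iff (L S : List Char) (h : S ≠ []) (h6 : S.length ≤ 6) :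
    (∃ i, (L.length - 6 ≤ i ∧ i < L.length) ∧ L.drop i = S) ↔ S <:+ L := by
  constructor
  · rintro ⟨i, _, rfl⟩; exact List.drop_suffix i L
  · rintro ⟨t, rfl⟩
    have hpos : 0 < S.length := List.length_pos_iff.mpr h
    refine ⟨t.length, ⟨?_, ?_⟩, by simp⟩ <;> simp only [List.length_append] <;> omega

theorem group_match (tok : String) (G : List String)
    (hne : ∀ s ∈ G, s.toList ≠ [] ∧ s.toList.length ≤ 6) :
    (∃ i, (tok.toList.length - 6 ≤ i ∧ i < tok.toList.length) ∧ tok.toList.drop i ∈ G.map String.toList) ↔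
      (G.any (fun s => PySem.Str.endswith tok s) = true) := by
  simp only [List.any_eq_true, PySem.Str.endswith_eq, PySem.Chars.endswith_iff, List.mem_map]
  constructor
  · rintro ⟨i, hi, s, hs, hdrop⟩
    exact ⟨s, hs, (drop_exists_iff _ _ (hne s hs).1 (hne s hs).2).mp ⟨i, hi, hdrop.symm⟩⟩
  · rintro ⟨s, hs, hsfx⟩
    obtain ⟨i, hi, hdrop⟩ := (drop_exists_iff _ _ (hne s hs).1 (hne s hs).2).mpr hsfx
    exact ⟨i, hi, s, hs, hdrop.symm⟩

theorem sufRank_le0 (l : List Char) : sufRank l ≤ 0 ↔ l ∈ nounKeys := by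
  unfold sufRank; split_ifs <;> simp_all

theorem sufRank_le1 (l : List Char) : sufRank l ≤ 1 ↔ (l ∈ nounKeys ∨ l ∈ verbKeys) := by
  unfold sufRank; split_ifs <;> simp_all

theorem sufRank_le2 (l : List Char) : sufRank l ≤ 2 ↔ (l ∈ nounKeys ∨ l ∈ verbKeys ∨ l ∈ adjKeys) := by
  unfold sufRank; split_ifs <;> simp_all

theorem sufRank_le3 (l : List Char) : sufRank l ≤ 3 ↔
    (l ∈ nounKeys ∨ l ∈ verbKeys ∨ l ∈ adjKeys ∨ l ∈ advKeys) := by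
  unfold sufRank; split_ifs <;> simp_all


theorem char_fold_eq (L : List Char) :
    L.foldl (fun m c => min m (charRank c)) 3 =
      (if L.any (fun c => PySem.Chars.isdigit c) then 0
       else if L.any (fun c => punct_chars.contains c) then 1
       else if L.any (fun c => PySem.Chars.isupper c) then 2 else 3) := by
  have key : ∀ k, (L.foldl (fun m c => min m (charRank c)) 3 ≤ k) ↔
      (3 ≤ k ∨ ∃ x ∈ L, charRank x ≤ k) := fun k => foldl_min_le charRank k L 3
  split_ifs with h1 h2 h3
  · have : L.foldl (fun m c => min m (charRank c)) 3 ≤ 0 := by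
      rw [key]; right
      obtain ⟨c, hc, hcd⟩ := List.any_eq_true.mp h1
      exact ⟨c, hc, (charRank_le0 c).mpr hcd⟩
    omega
  · have hle : L.foldl (fun m c => min m (charRank c)) 3 ≤ 1 := by
      rw [key]; right
      obtain ⟨c, hc, hcp⟩ := List.any_eq_true.mp h2
      exact ⟨c, hc, (charRank_le1 c).mpr (Or.inr hcp)⟩
    have hn : ¬ L.foldl (fun m c => min m (charRank c)) 3 ≤ 0 := by
      rw [key]
      rintro (h | ⟨x, hx, hf⟩)
      · omega
      · exact h1 (List.any_eq_true.mpr ⟨x, hx, (charRank_le0 x).mp hf⟩)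
    omega
  · have hle : L.foldl (fun m c => min m (charRank c)) 3 ≤ 2 := by
      rw [key]; right
      obtain ⟨c, hc, hcu⟩ := List.any_eq_true.mp h3
      exact ⟨c, hc, (charRank_le2 c).mpr (Or.inr (Or.inr hcu))⟩
    have hn : ¬ L.foldl (fun m c => min m (charRank c)) 3 ≤ 1 := by
      rw [key]
      rintro (h | ⟨x, hx, hf⟩)
      · omega
      · rcases (charRank_le1 x).mp hf with h | h
        · exact h1 (List.any_eq_true.mpr ⟨x, hx, h⟩)
        · exact h2 (List.any_eq_true.mpr ⟨x, hx, h⟩)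
    omega
  · have hle : L.foldl (fun m c => min m (charRank c)) 3 ≤ 3 := by
      rw [key]; exact Or.inl (le_refl 3)
    have hn : ¬ L.foldl (fun m c => min m (charRank c)) 3 ≤ 2 := by
      rw [key]
      rintro (h | ⟨x, hx, hf⟩)
      · omega
      · rcases (charRank_le2 x).mp hf with h | h | h
        · exact h1 (List.any_eq_true.mpr ⟨x, hx, h⟩)
        · exact h2 (List.any_eq_true.mpr ⟨x, hx, h⟩)
        · exact h3 (List.any_eq_true.mpr ⟨x, hx, h⟩)
    omega

theorem suffix_fold_eq (tok : String) :
    (List.range' (tok.toList.length - max_suffix_len)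
        (tok.toList.length - (tok.toList.length - max_suffix_len))).foldl
      (fun m i => min m (sufRank (tok.toList.drop i))) 4 =
      (if noun_suffix.any (fun s => PySem.Str.endswith tok s) then 0
       else if verb_suffix.any (fun s => PySem.Str.endswith tok s) then 1
       else if adj_suffix.any (fun s => PySem.Str.endswith tok s) then 2
       else if adv_suffix.any (fun s => PySem.Str.endswith tok s) then 3 else 4) := by
  have nounne : ∀ t ∈ noun_suffix, t.toList ≠ [] ∧ t.toList.length ≤ 6 := by decide
  have verbne : ∀ t ∈ verb_suffix, t.toList ≠ [] ∧ t.toList.length ≤ 6 := by decide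
  have adjne : ∀ t ∈ adj_suffix, t.toList ≠ [] ∧ t.toList.length ≤ 6 := by decide
  have advne : ∀ t ∈ adv_suffix, t.toList ≠ [] ∧ t.toList.length ≤ 6 := by decide
  have hmsl : max_suffix_len = 6 := by decide
  rw [hmsl]
  have hsum : (tok.toList.length - 6) + (tok.toList.length - (tok.toList.length - 6)) =
      tok.toList.length := by omega
  have key : ∀ k, ((List.range' (tok.toList.length - 6)
        (tok.toList.length - (tok.toList.length - 6))).foldl
      (fun m i => min m (sufRank (tok.toList.drop i))) 4 ≤ k) ↔
      (4 ≤ k ∨ ∃ i, (tok.toList.length - 6 ≤ i ∧ i < tok.toList.length) ∧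
          sufRank (tok.toList.drop i) ≤ k) := by
    intro k
    rw [foldl_min_le (fun i => sufRank (tok.toList.drop i)) k]
    simp only [List.mem_range'_1, hsum]
  split_ifs with h1 h2 h3 h4
  · have : (List.range' (tok.toList.length - 6) (tok.toList.length - (tok.toList.length - 6))).foldl (fun m i => min m (sufRank (tok.toList.drop i))) 4 ≤ 0 := by
      rw [key]; right
      obtain ⟨i, hi, hmem⟩ := (group_match tok noun_suffix nounne).mpr h1
      exact ⟨i, hi, (sufRank_le0 _).mpr hmem⟩
    omega
  · have hle : (List.range' (tok.toList.length - 6) (tok.toList.length - (tok.toList.length - 6))).foldl (fun m i => min m (sufRank (tok.toList.drop i))) 4 ≤ 1 := by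
      rw [key]; right
      obtain ⟨i, hi, hmem⟩ := (group_match tok verb_suffix verbne).mpr h2
      exact ⟨i, hi, (sufRank_le1 _).mpr (Or.inr hmem)⟩
    have hn : ¬ (List.range' (tok.toList.length - 6) (tok.toList.length - (tok.toList.length - 6))).foldl (fun m i => min m (sufRank (tok.toList.drop i))) 4 ≤ 0 := by
      rw [key]
      rintro (h | ⟨i, hi, hf⟩)
      · omega
      · exact h1 ((group_match tok noun_suffix nounne).mp ⟨i, hi, (sufRank_le0 _).mp hf⟩)
    omega
  · have hle : (List.range' (tok.toList.length - 6) (tok.toList.length - (tok.toList.length - 6))).foldl (fun m i => min m (sufRank (tok.toList.drop i))) 4 ≤ 2 := by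
      rw [key]; right
      obtain ⟨i, hi, hmem⟩ := (group_match tok adj_suffix adjne).mpr h3
      exact ⟨i, hi, (sufRank_le2 _).mpr (Or.inr (Or.inr hmem))⟩
    have hn : ¬ (List.range' (tok.toList.length - 6) (tok.toList.length - (tok.toList.length - 6))).foldl (fun m i => min m (sufRank (tok.toList.drop i))) 4 ≤ 1 := by
      rw [key]
      rintro (h | ⟨i, hi, hf⟩)
      · omega
      · rcases (sufRank_le1 _).mp hf with h | h
        · exact h1 ((group_match tok noun_suffix nounne).mp ⟨i, hi, h⟩)
        · exact h2 ((group_match tok verb_suffix verbne).mp ⟨i, hi, h⟩)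
    omega
  · have hle : (List.range' (tok.toList.length - 6) (tok.toList.length - (tok.toList.length - 6))).foldl (fun m i => min m (sufRank (tok.toList.drop i))) 4 ≤ 3 := by
      rw [key]; right
      obtain ⟨i, hi, hmem⟩ := (group_match tok adv_suffix advne).mpr h4
      exact ⟨i, hi, (sufRank_le3 _).mpr (Or.inr (Or.inr (Or.inr hmem)))⟩
    have hn : ¬ (List.range' (tok.toList.length - 6) (tok.toList.length - (tok.toList.length - 6))).foldl (fun m i => min m (sufRank (tok.toList.drop i))) 4 ≤ 2 := by
      rw [key]
      rintro (h | ⟨i, hi, hf⟩)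
      · omega
      · rcases (sufRank_le2 _).mp hf with h | h | h
        · exact h1 ((group_match tok noun_suffix nounne).mp ⟨i, hi, h⟩)
        · exact h2 ((group_match tok verb_suffix verbne).mp ⟨i, hi, h⟩)
        · exact h3 ((group_match tok adj_suffix adjne).mp ⟨i, hi, h⟩)
    omega
  · have hle : (List.range' (tok.toList.length - 6) (tok.toList.length - (tok.toList.length - 6))).foldl (fun m i => min m (sufRank (tok.toList.drop i))) 4 ≤ 4 := by
      rw [key]; exact Or.inl (le_refl 4)
    have hn : ¬ (List.range' (tok.toList.length - 6) (tok.toList.length - (tok.toList.length - 6))).foldl (fun m i => min m (sufRank (tok.toList.drop i))) 4 ≤ 3 := by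
      rw [key]
      rintro (h | ⟨i, hi, hf⟩)
      · omega
      · rcases (sufRank_le3 _).mp hf with h | h | h | h
        · exact h1 ((group_match tok noun_suffix nounne).mp ⟨i, hi, h⟩)
        · exact h2 ((group_match tok verb_suffix verbne).mp ⟨i, hi, h⟩)
        · exact h3 ((group_match tok adj_suffix adjne).mp ⟨i, hi, h⟩)
        · exact h4 ((group_match tok adv_suffix advne).mp ⟨i, hi, h⟩)
    omega

-- ===== VERDICT =====
theorem assign_unk_spec : Claim_equal_assign_unk := by
  intro tok _
  unfold Spec_assign_unk
  simp only [assign_unk, assign_unk_alt]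
  rw [char_fold_eq, suffix_fold_eq]
  split_ifs <;> simp_all [char_labels, suffix_labels]
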